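-- pv_equiv track=rewrite | github.com/Chunws13/Study | Etc/12100.py | up
-- ===== SOURCE A (Python) =====
-- import sys, copy
--
-- def up(origin, size):
--     info = copy.deepcopy(origin)
--     for i in range(size):
--         tmp = []
--         for j in range(size):
--             if info[j][i] != 0:
--                 tmp.append(info[j][i])
--             info[j][i] = 0
--
--         result_tmp = []
--         for t in range(len(tmp)):
--             if tmp[t] == 0:
--                 continue
--
--             if t != len(tmp)-1 and tmp[t] == tmp[t+1]:
--                 tmp[t], tmp[t+1] = tmp[t] * 2, 0
--
--             result_tmp.append(tmp[t])
--
--         for j, k in enumerate(result_tmp):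
--             info[j][i] = k
--
--     return info
-- ===== SOURCE B (Python) =====
-- def merge(col):
--     if len(col) >= 2 and col[0] == col[1]:
--         return [col[0] * 2] + merge(col[2:])
--     if col:
--         return [col[0]] + merge(col[1:])
--     return []
--
-- def up(origin, size):
--     result = [row[:] for row in origin]
--     for i in range(size):
--         col = [result[j][i] for j in range(size) if result[j][i] != 0]
--         merged = merge(col)
--         for j in range(size):
--             result[j][i] = merged[j] if j < len(merged) else 0
--     return result
-- ===== Notes on version B (the rewrite author's own statement) =====
-- stated objective: simpler
-- what changed: A zeroes each column in place, then runs an index loop that mutates tmp (writing 0 sentinels and doubled values back into tmp) and skips them on later iterations, finally re-writing a prefix of the column; B never mutates: it gathers the non-zero column with a comprehension, merges it with a small recursive two-at-a-time function, and writes each cell its final value (merged value or 0) in one pass.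
import Mathlib
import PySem

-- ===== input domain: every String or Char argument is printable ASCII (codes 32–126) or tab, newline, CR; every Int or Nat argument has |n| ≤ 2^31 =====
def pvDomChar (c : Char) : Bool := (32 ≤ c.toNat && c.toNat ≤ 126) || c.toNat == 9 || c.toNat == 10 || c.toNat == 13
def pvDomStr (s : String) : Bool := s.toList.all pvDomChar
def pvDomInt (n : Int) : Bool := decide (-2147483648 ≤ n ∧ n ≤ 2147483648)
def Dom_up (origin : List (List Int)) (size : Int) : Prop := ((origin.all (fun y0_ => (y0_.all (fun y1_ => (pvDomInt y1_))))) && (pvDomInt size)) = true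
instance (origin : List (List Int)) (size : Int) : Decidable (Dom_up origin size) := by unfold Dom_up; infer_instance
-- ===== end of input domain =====

-- B replaces A's in-place column mutation (zero the column, mutate tmp with 0 sentinels
-- while scanning it by index, rewrite a prefix) by a comprehension gather, a recursive
-- two-at-a-time merge, and a single pass writing each cell its final value: simpler.
-- Neither implementation mutates its argument (A deep-copies, B copies rows).

-- ===== PORT A =====
-- body of A's inner 'for j in range(size)' loop: append non-zero info[j][i] to tmp, set info[j][i] = 0
def gatherStep (i : Int) (p : List Int × List (List Int)) (j : Int) : List Int × List (List Int) :=
  let row := PySem.List.pyGetD p.2 j []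
  let v := PySem.List.pyGetD row i 0
  (if v ≠ 0 then p.1 ++ [v] else p.1, p.2.set j.toNat (row.set i.toNat 0))

-- body of A's 'for t in range(len(tmp))' loop; state = (tmp, result_tmp);
-- result_tmp.append(tmp[t]) reads tmp[t] AFTER the swap, i.e. x*2 in the merge branch
def mergeStep (p : List Int × List Int) (t : Int) : List Int × List Int :=
  let x := PySem.List.pyGetD p.1 t 0
  if x = 0 then p
  else if t ≠ (p.1.length : Int) - 1 ∧ x = PySem.List.pyGetD p.1 (t + 1) 0 then
    ((p.1.set t.toNat (x * 2)).set (t.toNat + 1) 0, p.2 ++ [x * 2])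
  else (p.1, p.2 ++ [x])

-- body of A's outer 'for i in range(size)' loop, acting on info
def colA (size i : Int) (info : List (List Int)) : List (List Int) :=
  let p1 := (PySem.List.pyRange 0 size 1).foldl (gatherStep i) ([], info)
  let p2 := (PySem.List.pyRange 0 (p1.1.length : Int) 1).foldl mergeStep (p1.1, [])
  (PySem.List.enumerate p2.2 0).foldl
    (fun g jk => g.set jk.1.toNat ((PySem.List.pyGetD g jk.1 []).set i.toNat jk.2)) p1.2

def up (origin : List (List Int)) (size : Int) : List (List Int) :=
  (PySem.List.pyRange 0 size 1).foldl (fun info i => colA size i info) origin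

-- ===== PORT B =====
-- Source B's merge: first branch len(col) >= 2 and col[0] == col[1], second branch non-empty, else []
def mergeB : List Int → List Int
  | x :: y :: rest => if x = y then x * 2 :: mergeB rest else x :: mergeB (y :: rest)
  | [x] => [x]
  | [] => []

-- body of B's 'for i in range(size)' loop, acting on result
def colB (size i : Int) (r : List (List Int)) : List (List Int) :=
  let col := ((PySem.List.pyRange 0 size 1).map
      (fun j => PySem.List.pyGetD (PySem.List.pyGetD r j []) i 0)).filter (fun v => v ≠ 0)
  let merged := mergeB col
  (PySem.List.pyRange 0 size 1).foldl
    (fun g j => g.set j.toNat ((PySem.List.pyGetD g j []).set i.toNat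
      (if j < (merged.length : Int) then PySem.List.pyGetD merged j 0 else 0))) r

def up_alt (origin : List (List Int)) (size : Int) : List (List Int) :=
  (PySem.List.pyRange 0 size 1).foldl (fun result i => colB size i result) origin

-- ===== PRECONDITION & SPEC =====
-- Pre_up: exactly the inputs where Python A returns (both Pythons raise IndexError when the
-- grid has fewer than size rows or one of the first size rows has fewer than size entries)
def Pre_up (origin : List (List Int)) (size : Int) : Prop :=
  (decide (size.toNat ≤ origin.length)
    && (origin.take size.toNat).all (fun row => decide (size.toNat ≤ row.length))) = true
instance (origin : List (List Int)) (size : Int) : Decidable (Pre_up origin size) := by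
  unfold Pre_up; infer_instance

def pvWitness_up : List (List Int) × Int := ([[2, 2], [2, 0]], 2)

def Spec_up (origin : List (List Int)) (size : Int) (out : List (List Int)) : Prop := out = up_alt origin size
instance (origin : List (List Int)) (size : Int) (out : List (List Int)) : Decidable (Spec_up origin size out) := by unfold Spec_up; infer_instance

-- ===== CLAIM (what is proved, stated in full; the proofs are below) =====
def Claim_equal_up : Prop := ∀ (origin : List (List Int)) (size : Int), Dom_up origin size → Pre_up origin size → Spec_up origin size (up origin size)

-- ===== LEMMAS AND PROOFS =====

-- abbreviations used only by the proofs
def zeroCol (n : Nat) (i : Int) (g : List (List Int)) : List (List Int) :=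
  g.mapIdx (fun j row => if j < n then row.set i.toNat 0 else row)

def colList (n : Nat) (i : Int) (g : List (List Int)) : List Int :=
  ((PySem.List.pyRange 0 (n : Int) 1).map
    (fun j => PySem.List.pyGetD (PySem.List.pyGetD g j []) i 0)).filter (fun v => v ≠ 0)

theorem pyRange0_toNat (size : Int) :
    PySem.List.pyRange 0 size 1 = PySem.List.pyRange 0 (size.toNat : Int) 1 := by
  by_cases h : 0 ≤ size
  · rw [Int.toNat_of_nonneg h]
  · rw [PySem.List.pyRange_one_eq_nil (by omega), PySem.List.pyRange_one_eq_nil (by omega)]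

theorem getD_mapIdx (g : List (List Int)) (f : Nat → List Int → List Int) (n : Nat) :
    (g.mapIdx f).getD n [] = if h : n < g.length then f n g[n] else [] := by
  by_cases h : n < g.length
  · rw [dif_pos h, List.getD_eq_getElem _ _ (by simpa using h), List.getElem_mapIdx]
  · rw [dif_neg h, List.getD_eq_default _ _ (by simpa using Nat.le_of_not_lt h)]

theorem getD_append_length (pre : List Int) (x : Int) (l : List Int) (d : Int) :
    (pre ++ x :: l).getD pre.length d = x := by
  rw [List.getD_eq_getElem _ _ (by simp)]
  simp

theorem getD_append_length_one (pre : List Int) (x y : Int) (l : List Int) (d : Int) :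
    (pre ++ x :: y :: l).getD (pre.length + 1) d = y := by
  have h : pre ++ x :: y :: l = (pre ++ [x]) ++ y :: l := by simp
  rw [h, show pre.length + 1 = (pre ++ [x]).length by simp, getD_append_length]

theorem set_append_length (pre : List Int) (x v : Int) (l : List Int) :
    (pre ++ x :: l).set pre.length v = pre ++ v :: l := by
  induction pre with
  | nil => simp
  | cons a pre ih => simp [ih]

-- the three "update row j" steps, characterised against mapIdx
theorem zeroCol_zero (i : Int) (g : List (List Int)) : zeroCol 0 i g = g := by
  apply List.ext_getElem
  · simp [zeroCol]
  · intro j h1 h2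
    simp [zeroCol]

theorem zeroCol_set (n : Nat) (i : Int) (g : List (List Int)) :
    (zeroCol n i g).set n ((g.getD n []).set i.toNat 0) = zeroCol (n + 1) i g := by
  apply List.ext_getElem
  · simp [zeroCol]
  · intro j h1 h2
    have hg : j < g.length := by simpa [zeroCol] using h2
    rw [List.getElem_set]
    simp only [zeroCol, List.getElem_mapIdx]
    by_cases hj : n = j
    · subst hj
      rw [if_pos rfl, if_pos (by omega), List.getD_eq_getElem _ _ hg]
    · rw [if_neg hj]
      by_cases hjn : j < n
      · rw [if_pos hjn, if_pos (by omega)]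
      · rw [if_neg hjn, if_neg (by omega)]

-- ===== gather phase =====
theorem gather_spec (i : Int) : ∀ (n : Nat) (g : List (List Int)) (tmp0 : List Int),
    (PySem.List.pyRange 0 (n : Int) 1).foldl (gatherStep i) (tmp0, g)
      = (tmp0 ++ colList n i g, zeroCol n i g) := by
  intro n
  induction n with
  | zero =>
    intro g tmp0
    rw [Nat.cast_zero, PySem.List.pyRange_one_eq_nil (le_refl 0), List.foldl_nil, zeroCol_zero]
    simp [colList, PySem.List.pyRange_one_eq_nil (le_refl (0 : Int))]
  | succ n ih =>
    intro g tmp0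
    have hr : PySem.List.pyRange 0 ((n + 1 : Nat) : Int) 1
        = PySem.List.pyRange 0 (n : Int) 1 ++ [(n : Int)] := by
      push_cast
      exact PySem.List.pyRange_one_succ_right (by positivity)
    rw [hr, List.foldl_append, ih]
    simp only [List.foldl_cons, List.foldl_nil]
    unfold gatherStep
    have hrow : PySem.List.pyGetD (zeroCol n i g) (n : Int) [] = g.getD n [] := by
      rw [PySem.List.pyGetD_natCast]
      simp only [zeroCol]
      rw [getD_mapIdx]
      by_cases h : n < g.length
      · rw [dif_pos h, if_neg (lt_irrefl n), List.getD_eq_getElem _ _ h]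
      · rw [dif_neg h, List.getD_eq_default _ _ (by omega)]
    have hcol : colList (n + 1) i g
        = colList n i g ++ (if PySem.List.pyGetD (g.getD n []) i 0 ≠ 0
            then [PySem.List.pyGetD (g.getD n []) i 0] else []) := by
      simp only [colList]
      rw [hr, List.map_append, List.filter_append]
      simp only [List.map_cons, List.map_nil, PySem.List.pyGetD_natCast]
      split
      · simp_all
      · simp_all
    simp only [hrow, Int.toNat_natCast]
    rw [zeroCol_set, hcol]
    simp only [Prod.mk.injEq, and_true]
    split
    · simp
    · simp

-- ===== merge phase: A's index loop with in-place 0 sentinels equals the recursive merge =====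
theorem mergeB_length_le : ∀ l : List Int, (mergeB l).length ≤ l.length
  | [] => by simp [mergeB]
  | [x] => by simp [mergeB]
  | x :: y :: rest => by
    have h1 := mergeB_length_le rest
    have h2 := mergeB_length_le (y :: rest)
    unfold mergeB
    split
    · simp only [List.length_cons]
      omega
    · simp only [List.length_cons] at *
      omega

theorem merge_spec : ∀ (m : Nat) (rest pre acc : List Int), rest.length ≤ m →
    (∀ x ∈ rest, x ≠ 0) →
    ((PySem.List.pyRange (pre.length : Int) ((pre.length : Int) + (rest.length : Int)) 1).foldl
        mergeStep (pre ++ rest, acc)).2 = acc ++ mergeB rest := by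
  intro m
  induction m with
  | zero =>
    intro rest pre acc hlen _
    cases rest with
    | cons a l => simp at hlen
    | nil =>
      simp [mergeB]
  | succ m ih =>
    intro rest pre acc hlen hnz
    match rest with
    | [] =>
      simp [mergeB]
    | [x] =>
      have hx : x ≠ 0 := hnz x (by simp)
      rw [show (pre.length : Int) + (([x] : List Int).length : Int) = (pre.length : Int) + 1 by simp,
        PySem.List.pyRange_one_singleton]
      simp only [List.foldl_cons, List.foldl_nil]
      unfold mergeStep
      simp only [PySem.List.pyGetD_natCast, Int.toNat_natCast, getD_append_length]
      rw [if_neg hx, if_neg (fun hand => hand.1 (by simp))]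
      simp [mergeB]
    | x :: y :: rest'' =>
      have hx : x ≠ 0 := hnz x (by simp)
      have hlen2 : ((pre ++ x :: y :: rest'').length : Int)
          = (pre.length : Int) + 2 + (rest''.length : Int) := by
        simp only [List.length_append, List.length_cons]
        push_cast
        ring
      have hcons : PySem.List.pyRange (pre.length : Int)
          ((pre.length : Int) + ((x :: y :: rest'').length : Int)) 1
          = (pre.length : Int) :: PySem.List.pyRange ((pre.length : Int) + 1)
              ((pre.length : Int) + ((x :: y :: rest'').length : Int)) 1 :=
        PySem.List.pyRange_one_cons (by simp only [List.length_cons]; push_cast; omega)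
      rw [hcons, List.foldl_cons]
      have hget1 : PySem.List.pyGetD (pre ++ x :: y :: rest'') ((pre.length : Int) + 1) 0 = y := by
        rw [show (pre.length : Int) + 1 = ((pre.length + 1 : Nat) : Int) by push_cast; ring,
          PySem.List.pyGetD_natCast, getD_append_length_one]
      by_cases hxy : x = y
      · -- A merges: tmp[t] := x*2, tmp[t+1] := 0, appends x*2; index t+1 is then skipped
        have hstep : mergeStep (pre ++ x :: y :: rest'', acc) (pre.length : Int)
            = ((pre ++ [x * 2, 0]) ++ rest'', acc ++ [x * 2]) := by
          unfold mergeStep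
          simp only [PySem.List.pyGetD_natCast, Int.toNat_natCast, getD_append_length]
          rw [if_neg hx, if_pos ⟨by rw [hlen2]; omega, by rw [hget1]; exact hxy⟩,
            set_append_length,
            show pre ++ x * 2 :: y :: rest'' = (pre ++ [x * 2]) ++ y :: rest'' by simp,
            show pre.length + 1 = (pre ++ [x * 2]).length by simp, set_append_length]
          simp
        rw [hstep]
        have hcons2 : PySem.List.pyRange ((pre.length : Int) + 1)
            ((pre.length : Int) + ((x :: y :: rest'').length : Int)) 1
            = ((pre.length : Int) + 1) :: PySem.List.pyRange ((pre.length : Int) + 1 + 1)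
                ((pre.length : Int) + ((x :: y :: rest'').length : Int)) 1 :=
          PySem.List.pyRange_one_cons (by simp only [List.length_cons]; push_cast; omega)
        rw [hcons2, List.foldl_cons]
        have hstep2 : mergeStep ((pre ++ [x * 2, 0]) ++ rest'', acc ++ [x * 2])
            ((pre.length : Int) + 1) = ((pre ++ [x * 2, 0]) ++ rest'', acc ++ [x * 2]) := by
          unfold mergeStep
          rw [show (pre.length : Int) + 1 = ((pre.length + 1 : Nat) : Int) by push_cast; ring,
            PySem.List.pyGetD_natCast,
            show pre ++ [x * 2, 0] ++ rest'' = (pre ++ [x * 2]) ++ 0 :: rest'' by simp,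
            show pre.length + 1 = (pre ++ [x * 2]).length by simp, getD_append_length]
          rw [if_pos rfl]
        rw [hstep2]
        have hih := ih rest'' (pre ++ [x * 2, 0]) (acc ++ [x * 2])
          (by simp only [List.length_cons] at hlen; omega) (fun z hz => hnz z (by simp [hz]))
        rw [show (pre.length : Int) + 1 + 1 = (((pre ++ [x * 2, 0]).length : Nat) : Int) by
            simp only [List.length_append, List.length_cons, List.length_nil]
            push_cast
            ring,
          show (pre.length : Int) + (((x :: y :: rest'') : List Int).length : Int)
            = (((pre ++ [x * 2, 0]).length : Nat) : Int) + ((rest'' : List Int).length : Int) by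
            simp only [List.length_append, List.length_cons, List.length_nil]
            push_cast
            ring,
          hih]
        subst hxy
        simp [mergeB]
      · -- no merge: A appends x and moves on
        have hstep : mergeStep (pre ++ x :: y :: rest'', acc) (pre.length : Int)
            = ((pre ++ [x]) ++ (y :: rest''), acc ++ [x]) := by
          unfold mergeStep
          simp only [PySem.List.pyGetD_natCast, Int.toNat_natCast, getD_append_length]
          rw [if_neg hx, if_neg (fun hand => hxy (by rw [← hget1]; exact hand.2))]
          simp
        rw [hstep]
        have hih := ih (y :: rest'') (pre ++ [x]) (acc ++ [x])
          (by simp only [List.length_cons] at hlen ⊢; omega)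
          (fun z hz => hnz z (by simp at hz; rcases hz with h | h <;> simp [h]))
        rw [show (pre.length : Int) + 1 = (((pre ++ [x]).length : Nat) : Int) by simp,
          show (pre.length : Int) + (((x :: y :: rest'') : List Int).length : Int)
            = (((pre ++ [x]).length : Nat) : Int) + (((y :: rest'') : List Int).length : Int) by
            simp only [List.length_append, List.length_cons, List.length_nil]
            push_cast
            ring,
          hih]
        simp [mergeB, if_neg hxy]

-- ===== write-back phases =====
theorem wbA_spec (i : Int) : ∀ (res : List Int) (s : Nat) (g : List (List Int)),
    (PySem.List.enumerate res (s : Int)).foldl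
      (fun g jk => g.set jk.1.toNat ((PySem.List.pyGetD g jk.1 []).set i.toNat jk.2)) g
    = g.mapIdx (fun j row =>
        if s ≤ j ∧ j < s + res.length then row.set i.toNat (res.getD (j - s) 0) else row) := by
  intro res
  induction res with
  | nil =>
    intro s g
    rw [PySem.List.enumerate_nil, List.foldl_nil]
    apply List.ext_getElem
    · simp
    · intro j h1 h2
      rw [List.getElem_mapIdx, if_neg (by simp only [List.length_nil]; omega)]
  | cons k res ih =>
    intro s g
    rw [PySem.List.enumerate_cons, List.foldl_cons,
      show (s : Int) + 1 = ((s + 1 : Nat) : Int) by push_cast; ring, ih]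
    simp only [PySem.List.pyGetD_natCast, Int.toNat_natCast]
    apply List.ext_getElem
    · simp
    · intro j h1 h2
      have hglen : j < g.length := by simpa using h2
      rw [List.getElem_mapIdx, List.getElem_mapIdx, List.getElem_set]
      by_cases hj : s = j
      · subst hj
        rw [if_pos rfl, if_neg (by omega), if_pos (by simp only [List.length_cons]; omega)]
        simp only [Nat.sub_self, List.getD_cons_zero]
        rw [List.getD_eq_getElem _ _ hglen]
      · rw [if_neg hj]
        by_cases hin : s + 1 ≤ j ∧ j < s + 1 + res.length
        · rw [if_pos hin, if_pos (by simp only [List.length_cons]; omega),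
            show j - s = (j - (s + 1)) + 1 by omega]
          simp
        · rw [if_neg hin, if_neg (by simp only [List.length_cons]; omega)]

theorem wbB_spec (i : Int) (merged : List Int) : ∀ (n : Nat) (g : List (List Int)),
    (PySem.List.pyRange 0 (n : Int) 1).foldl
      (fun g j => g.set j.toNat ((PySem.List.pyGetD g j []).set i.toNat
        (if j < (merged.length : Int) then PySem.List.pyGetD merged j 0 else 0))) g
    = g.mapIdx (fun j row => if j < n then row.set i.toNat (merged.getD j 0) else row) := by
  intro n
  induction n with
  | zero =>
    intro g
    rw [Nat.cast_zero, PySem.List.pyRange_one_eq_nil (le_refl 0), List.foldl_nil]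
    apply List.ext_getElem
    · simp
    · intro j h1 h2
      rw [List.getElem_mapIdx, if_neg (by omega)]
  | succ n ih =>
    intro g
    have hr : PySem.List.pyRange 0 ((n + 1 : Nat) : Int) 1
        = PySem.List.pyRange 0 (n : Int) 1 ++ [(n : Int)] := by
      push_cast
      exact PySem.List.pyRange_one_succ_right (by positivity)
    rw [hr, List.foldl_append, ih, List.foldl_cons, List.foldl_nil]
    simp only [PySem.List.pyGetD_natCast, Int.toNat_natCast]
    have hval : (if (n : Int) < (merged.length : Int) then merged.getD n 0 else 0)
        = merged.getD n 0 := by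
      split
      · rfl
      · rw [List.getD_eq_default _ _ (by omega)]
    rw [hval, getD_mapIdx]
    apply List.ext_getElem
    · simp
    · intro j h1 h2
      have hglen : j < g.length := by simpa using h2
      rw [List.getElem_set, List.getElem_mapIdx]
      by_cases hj : n = j
      · subst hj
        rw [if_pos rfl, dif_pos hglen, if_neg (lt_irrefl n), List.getElem_mapIdx, if_pos (by omega)]
      · rw [if_neg hj, List.getElem_mapIdx]
        by_cases hjn : j < n
        · rw [if_pos hjn, if_pos (by omega)]
        · rw [if_neg hjn, if_neg (by omega)]

-- ===== putting one column step together =====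
theorem colA_eq_colB_proof : ∀ (size i : Int) (g : List (List Int)), colA size i g = colB size i g := by
  intro size i g
  have hnz : ∀ x ∈ colList size.toNat i g, x ≠ 0 := by
    intro x hx
    simpa using (List.mem_filter.mp hx).2
  have hcolB : colB size i g = g.mapIdx (fun j row => if j < size.toNat
      then row.set i.toNat ((mergeB (colList size.toNat i g)).getD j 0) else row) := by
    unfold colB
    rw [pyRange0_toNat]
    exact wbB_spec i (mergeB (colList size.toNat i g)) size.toNat g
  have hcolA : colA size i g = (zeroCol size.toNat i g).mapIdx (fun j row =>
      if 0 ≤ j ∧ j < 0 + (mergeB (colList size.toNat i g)).length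
      then row.set i.toNat ((mergeB (colList size.toNat i g)).getD (j - 0) 0) else row) := by
    unfold colA
    rw [pyRange0_toNat, gather_spec]
    simp only [List.nil_append]
    have hres := merge_spec (colList size.toNat i g).length (colList size.toNat i g) [] []
      (le_refl _) hnz
    simp only [List.length_nil, Nat.cast_zero, List.nil_append, zero_add] at hres
    rw [hres]
    have hwba := wbA_spec i (mergeB (colList size.toNat i g)) 0 (zeroCol size.toNat i g)
    rw [Nat.cast_zero] at hwba
    rw [hwba]
  rw [hcolA, hcolB]
  have hreslen : (mergeB (colList size.toNat i g)).length ≤ size.toNat := by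
    have h1 := mergeB_length_le (colList size.toNat i g)
    have h2 : (colList size.toNat i g).length ≤ size.toNat := by
      simp only [colList]
      calc (((PySem.List.pyRange 0 (size.toNat : Int) 1).map
              (fun j => PySem.List.pyGetD (PySem.List.pyGetD g j []) i 0)).filter
              (fun v => v ≠ 0)).length
          ≤ ((PySem.List.pyRange 0 (size.toNat : Int) 1).map
              (fun j => PySem.List.pyGetD (PySem.List.pyGetD g j []) i 0)).length :=
            List.length_filter_le _ _
        _ = size.toNat := by
            simp [PySem.List.length_pyRange_one]
            omega
    omega
  set res := mergeB (colList size.toNat i g) with hresdef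
  apply List.ext_getElem
  · simp [zeroCol]
  · intro j h1 h2
    have hglen : j < g.length := by simpa [zeroCol] using h1
    rw [List.getElem_mapIdx, List.getElem_mapIdx]
    simp only [zeroCol, List.getElem_mapIdx]
    by_cases hjr : j < res.length
    · rw [if_pos (by omega : 0 ≤ j ∧ j < 0 + res.length), if_pos (by omega : j < size.toNat),
        if_pos (by omega : j < size.toNat)]
      simp only [Nat.sub_zero, List.set_set]
    · rw [if_neg (by omega : ¬ (0 ≤ j ∧ j < 0 + res.length))]
      by_cases hjn : j < size.toNat
      · rw [if_pos hjn, if_pos hjn, List.getD_eq_default _ _ (by omega)]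
      · rw [if_neg hjn, if_neg hjn]

theorem up_spec_aux : ∀ (origin : List (List Int)) (size : Int), up origin size = up_alt origin size := by
  intro origin size
  unfold up up_alt
  simp only [colA_eq_colB_proof]

-- ===== VERDICT (by name: the statement is the Claim_ definition above) =====
theorem up_spec : Claim_equal_up := by
  intro origin size _ _
  unfold Spec_up
  exact up_spec_aux origin size
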